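-- pv_equiv track=rewrite | github.com/dlwogus5038/MITRE-ATTACK-Based-Network-Protect-Tool | gui_test1.py | arrange_string
-- ===== SOURCE A (Python) =====
-- def arrange_string(arr, split_len):
--     result_str = ""
--     row_count = 0
--     while 1:
--         if len(arr) == 0 or len(arr) <= split_len:
--             result_str += arr
--             row_count += 1
--             break
--         else:
--             tmp_str = arr[:split_len]
--             while 1:
--                 if tmp_str == '':
--                     tmp_str = arr[:split_len]
--                     break
--                 elif tmp_str[-1] == ' ':
--                     break
--                 else:
--                     tmp_str = tmp_str[:-1]
--
--             arr = arr[len(tmp_str):]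
--             result_str += tmp_str + '\n'
--             row_count += 1
--
--     return (result_str, row_count)
-- ===== SOURCE B (Python) =====
-- def arrange_string(arr, split_len):
--     n = len(arr)
--     if n == 0 or n <= split_len:
--         return (arr, 1)
--     spaces = [i for i, c in enumerate(arr) if c == ' ']
--     lines = []
--     start = 0
--     brk = -1
--     while n - start > split_len:
--         limit = start + split_len
--         while spaces and spaces[0] < limit:
--             brk = spaces[0]
--             spaces = spaces[1:]
--         end = brk + 1 if brk >= start else limit
--         lines.append(arr[start:end] + '\n')
--         start = end
--     lines.append(arr[start:])
--     return ("".join(lines), len(lines))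
-- ===== Notes on version B (the rewrite author's own statement) =====
-- stated objective: alternative
-- what changed: B precomputes the list of all space positions once and consumes it with a moving pointer to find each line's break, instead of A's per-line backwards character-by-character strip of the window slice; Pre_ excludes nonempty strings with split_len <= 0, where A's outer loop never terminates.
import Mathlib
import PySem

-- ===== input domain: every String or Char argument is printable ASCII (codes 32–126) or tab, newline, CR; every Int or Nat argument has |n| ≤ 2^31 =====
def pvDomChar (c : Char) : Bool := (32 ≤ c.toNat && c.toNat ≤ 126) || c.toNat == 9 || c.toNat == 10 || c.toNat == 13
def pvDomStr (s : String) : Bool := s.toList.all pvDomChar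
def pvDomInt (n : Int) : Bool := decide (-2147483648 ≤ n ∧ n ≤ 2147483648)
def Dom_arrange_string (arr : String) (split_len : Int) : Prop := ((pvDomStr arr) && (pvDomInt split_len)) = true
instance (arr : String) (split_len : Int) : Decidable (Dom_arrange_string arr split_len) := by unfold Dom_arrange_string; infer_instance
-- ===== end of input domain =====

-- B word-wraps with a precomputed table of space positions consumed by a moving pointer
-- (one pass over the spaces overall) instead of A's per-line backwards character strip;
-- objective: alternative algorithm.

-- ===== PORT A =====
-- inner 'while 1' strip loop: tmp_str == '' → arr[:split_len]; tmp_str[-1]==' ' → stop; else tmp_str = tmp_str[:-1]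
def pvStripA (arr : List Char) (split_len : Int) (tmp : List Char) : List Char :=
  match tmp with
  | [] => PySem.List.slice arr none (some split_len)
  | c :: cs =>
    if (c :: cs).getLast? = some ' ' then c :: cs
    else pvStripA arr split_len (c :: cs).dropLast
termination_by tmp.length
decreasing_by simp

-- outer 'while 1' loop; fuel only makes the recursion total (unreachable 0 under Pre_)
def pvLoopA (split_len : Int) : Nat → List Char → List Char → Int → (List Char × Int)
  | 0, _, res, row => (res, row)
  | fuel + 1, arr, res, row =>
    if arr.length = 0 ∨ (arr.length : Int) ≤ split_len then (res ++ arr, row + 1)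
    else
      let tmp := pvStripA arr split_len (PySem.List.slice arr none (some split_len))
      pvLoopA split_len fuel (PySem.List.slice arr (some (tmp.length : Int)) none)
        (res ++ tmp ++ ['\n']) (row + 1)

def arrange_string (arr : String) (split_len : Int) : String × Int :=
  let r := pvLoopA split_len (arr.toList.length + 1) arr.toList [] 0
  (String.ofList r.1, r.2)

-- ===== PORT B =====
-- spaces = [i for i, c in enumerate(arr) if c == ' ']
def pvSpacesB (arr : List Char) : List Int :=
  (PySem.List.enumerate arr 0).filterMap (fun p => if p.2 = ' ' then some p.1 else none)

-- 'while spaces and spaces[0] < limit: brk = spaces[0]; spaces = spaces[1:]'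
def pvConsumeB (limit : Int) : List Int → Int → (List Int × Int)
  | [], brk => ([], brk)
  | s :: rest, brk => if s < limit then pvConsumeB limit rest s else (s :: rest, brk)

-- outer 'while n - start > split_len' loop; fuel only makes the recursion total
def pvLoopB (arr : List Char) (n split_len : Int) :
    Nat → Int → List Int → Int → List (List Char) → List (List Char)
  | 0, _, _, _, lines => lines
  | fuel + 1, start, spaces, brk, lines =>
    if n - start > split_len then
      let limit := start + split_len
      let p := pvConsumeB limit spaces brk
      let e := if p.2 ≥ start then p.2 + 1 else limit
      pvLoopB arr n split_len fuel e p.1 p.2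
        (lines ++ [PySem.List.slice arr (some start) (some e) ++ ['\n']])
    else lines ++ [PySem.List.slice arr (some start) none]

def arrange_string_alt (arr : String) (split_len : Int) : String × Int :=
  let cs := arr.toList
  if cs.length = 0 ∨ (cs.length : Int) ≤ split_len then (arr, 1)
  else
    let lines := pvLoopB cs (cs.length : Int) split_len (cs.length + 1) 0 (pvSpacesB cs) (-1) []
    (String.ofList (PySem.Chars.join [] lines), (lines.length : Int))

-- ===== PRECONDITION & SPEC =====
-- Pre_ excludes nonempty arr with split_len ≤ 0, where A's outer loop never terminates (no return).
def Pre_arrange_string (arr : String) (split_len : Int) : Prop := 1 ≤ split_len ∨ arr = ""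
instance (arr : String) (split_len : Int) : Decidable (Pre_arrange_string arr split_len) := by
  unfold Pre_arrange_string; infer_instance

def pvWitness_arrange_string : String × Int := ("hello wide world", 7)

def Spec_arrange_string (arr : String) (split_len : Int) (out : String × Int) : Prop :=
  out = arrange_string_alt arr split_len
instance (arr : String) (split_len : Int) (out : String × Int) : Decidable (Spec_arrange_string arr split_len out) := by
  unfold Spec_arrange_string; infer_instance

-- ===== CLAIM (what is proved, stated in full; the proofs are below) =====
def Claim_equal_arrange_string : Prop := ∀ (arr : String) (split_len : Int), Dom_arrange_string arr split_len → Pre_arrange_string arr split_len → Spec_arrange_string arr split_len (arrange_string arr split_len)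

-- ===== LEMMAS AND PROOFS =====

-- join with empty separator is flatten
theorem pvJoin_eq_flatten (l : List (List Char)) : PySem.Chars.join [] l = l.flatten := by
  induction l with
  | nil => rfl
  | cons a l ih => cases l <;> simp_all [PySem.Chars.join, List.intercalate, List.intersperse]

-- membership in the space table
theorem pvMem_spacesB (cs : List Char) (i : Int) :
    i ∈ pvSpacesB cs ↔ ∃ (m : Nat) (_ : m < cs.length), i = (m : Int) ∧ cs[m] = ' ' := by
  simp only [pvSpacesB, List.mem_filterMap, PySem.List.mem_enumerate_iff]
  constructor
  · rintro ⟨⟨a, c⟩, ⟨k, hk, rfl, rfl⟩, h⟩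
    simp only [zero_add] at *
    split at h
    · rename_i hc; exact ⟨k, hk, by simpa using h.symm, hc⟩
    · exact absurd h (by simp)
  · rintro ⟨m, hm, rfl, hc⟩
    exact ⟨((m : Int), cs[m]), ⟨m, hm, by simp⟩, by simp [hc]⟩

-- the space table is strictly increasing
theorem pvPairwise_spacesB (cs : List Char) : (pvSpacesB cs).Pairwise (· < ·) := by
  have h := PySem.List.pairwise_lt_enumerate (xs := cs) (s := 0)
  refine List.Pairwise.filterMap _ ?_ h
  intro p q hpq u hu v hv
  split at hu <;> split at hv <;> simp_all

theorem pvGetLastD_cons' (s : Int) (l : List Int) (brk : Int) :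
    (s :: l).getLastD brk = l.getLastD s := List.getLastD_cons

-- the inner consume loop in closed form
theorem pvConsume_eq (limit : Int) (ws : List Int) (brk : Int) :
    pvConsumeB limit ws brk =
      (ws.dropWhile (fun x => decide (x < limit)),
       (ws.takeWhile (fun x => decide (x < limit))).getLastD brk) := by
  induction ws generalizing brk with
  | nil => rfl
  | cons s rest ih =>
    by_cases h : s < limit
    · rw [pvConsumeB, if_pos h, ih, List.dropWhile_cons, List.takeWhile_cons]
      simp only [h, decide_true, if_true]
      rw [pvGetLastD_cons']
    · rw [pvConsumeB, if_neg h, List.dropWhile_cons, List.takeWhile_cons]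
      simp [h]

-- on a strictly increasing list, everything dropWhile (< limit) keeps is ≥ limit
theorem pvDropWhile_ge (limit : Int) (ws : List Int) (hw : ws.Pairwise (· < ·)) :
    ∀ x ∈ ws.dropWhile (fun x => decide (x < limit)), limit ≤ x := by
  induction ws with
  | nil => simp
  | cons s rest ih =>
    intro x hx
    rw [List.dropWhile_cons] at hx
    split at hx
    · exact ih hw.of_cons x hx
    · rename_i h
      simp only [decide_eq_true_eq, not_lt] at h
      rcases List.mem_cons.mp hx with rfl | hx'
      · omega
      · have : s < x := (List.pairwise_cons.mp hw).1 x hx'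
        omega

-- on a strictly increasing list every element is ≤ the last one
theorem pvLe_getLastD (ws : List Int) :
    ∀ (d : Int), ws.Pairwise (· < ·) → ∀ x ∈ ws, x ≤ ws.getLastD d := by
  induction ws with
  | nil => simp
  | cons s rest ih =>
    intro d hw x hx
    cases rest with
    | nil => simp_all
    | cons b l =>
      rw [pvGetLastD_cons']
      rcases List.mem_cons.mp hx with rfl | hx'
      · have h1 : x < b := (List.pairwise_cons.mp hw).1 b (by simp)
        have h2 : b ≤ (b :: l).getLastD x := ih x hw.of_cons b (by simp)
        omega
      · exact ih s hw.of_cons x hx'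

-- strip loop: a nonempty string ending in ' ' is returned unchanged
theorem pvStrip_stop (arr : List Char) (spl : Int) (t : List Char)
    (ht : t.getLast? = some ' ') : pvStripA arr spl t = t := by
  cases t with
  | nil => simp at ht
  | cons y ys => rw [pvStripA, if_pos ht]

-- strip loop: a trailing non-space character is dropped
theorem pvStrip_step (arr : List Char) (spl : Int) (t : List Char) (c : Char) (hc : c ≠ ' ') :
    pvStripA arr spl (t ++ [c]) = pvStripA arr spl t := by
  cases t with
  | nil =>
    simp only [List.nil_append]
    conv_lhs => rw [pvStripA]
    simp [hc]
  | cons y ys =>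
    have hshape : (y :: ys) ++ [c] = y :: (ys ++ [c]) := by simp
    have hg : (y :: (ys ++ [c])).getLast? = some c := by
      rw [← hshape]; exact List.getLast?_concat
    rw [hshape]
    conv_lhs => rw [pvStripA]
    rw [if_neg (by simp [hg, hc]),
      show (y :: (ys ++ [c])).dropLast = y :: ys by
        simpa using List.dropLast_concat (l₁ := y :: ys) (b := c)]

-- strip loop on a string with no space: falls through to arr[:split_len]
theorem pvStrip_nospace (arr : List Char) (spl : Int) (t : List Char)
    (h : ∀ c ∈ t, c ≠ ' ') :
    pvStripA arr spl t = PySem.List.slice arr none (some spl) := by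
  induction t using List.reverseRecOn with
  | nil => rw [pvStripA]
  | append_singleton ys c ih =>
    rw [pvStrip_step arr spl ys c (h c (by simp))]
    exact ih (fun x hx => h x (by simp [hx]))

-- strip loop stops exactly after the last space
theorem pvStrip_space (arr : List Char) (spl : Int) (t1 t2 : List Char)
    (h : ∀ c ∈ t2, c ≠ ' ') :
    pvStripA arr spl (t1 ++ ' ' :: t2) = t1 ++ [' '] := by
  induction t2 using List.reverseRecOn with
  | nil => exact pvStrip_stop arr spl _ (by simp)
  | append_singleton ys c ih =>
    rw [show t1 ++ ' ' :: (ys ++ [c]) = (t1 ++ ' ' :: ys) ++ [c] by simp,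
      pvStrip_step arr spl _ c (h c (by simp))]
    exact ih (fun x hx => h x (by simp [hx]))

-- join with empty separator over a snoc
theorem pvJoin_snoc (l : List (List Char)) (x : List Char) :
    PySem.Chars.join [] (l ++ [x]) = PySem.Chars.join [] l ++ x := by
  simp [pvJoin_eq_flatten]

-- a space inside the current window lies in the not-yet-consumed part of the table
theorem pvSpace_in_spaces (cs : List Char) (startN : Nat) (done spaces : List Int)
    (hW : pvSpacesB cs = done ++ spaces)
    (hdone : ∀ x ∈ done, x < (startN : Int))
    (m : Nat) (hm : startN + m < cs.length) (hc : cs[startN + m] = ' ') :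
    ((startN + m : Nat) : Int) ∈ spaces := by
  have hmem : ((startN + m : Nat) : Int) ∈ pvSpacesB cs :=
    (pvMem_spacesB cs _).mpr ⟨startN + m, hm, rfl, hc⟩
  rw [hW] at hmem
  rcases List.mem_append.mp hmem with h | h
  · have := hdone _ h
    have : (startN : Int) + m < startN := by push_cast at this ⊢; omega
    omega
  · exact h

-- the main lockstep lemma: A's loop and B's loop agree step for step
theorem pvLoop_eq (cs : List Char) (spl : Int) (hspl : 1 ≤ spl) :
    ∀ (fuel : Nat) (startN : Nat) (done spaces : List Int) (brk : Int)
      (lines : List (List Char)),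
      startN ≤ cs.length →
      pvSpacesB cs = done ++ spaces →
      (∀ x ∈ done, x < (startN : Int)) →
      (∀ x ∈ spaces, (startN : Int) ≤ x) →
      brk < (startN : Int) →
      pvLoopA spl fuel (cs.drop startN) (PySem.Chars.join [] lines) (lines.length : Int) =
        (PySem.Chars.join [] (pvLoopB cs (cs.length : Int) spl fuel (startN : Int) spaces brk lines),
         ((pvLoopB cs (cs.length : Int) spl fuel (startN : Int) spaces brk lines).length : Int)) := by
  intro fuel
  induction fuel with
  | zero => intros; rfl
  | succ fuel ih =>
    intro startN done spaces brk lines hstart hW hdone hsp hbrk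
    have hWpw : (done ++ spaces).Pairwise (· < ·) := by rw [← hW]; exact pvPairwise_spacesB cs
    have hsppw : spaces.Pairwise (· < ·) := (List.pairwise_append.mp hWpw).2.1
    have hslen : (cs.drop startN).length = cs.length - startN := List.length_drop
    by_cases hc : (cs.length : Int) - (startN : Int) > spl
    · -- loop body runs
      set k := spl.toNat with hkdef
      have hkk : (k : Int) = spl := Int.toNat_of_nonneg (by omega)
      have hk1 : 1 ≤ k := by omega
      have hsl : k < (cs.drop startN).length := by rw [hslen]; omega
      have hAcond : ¬((cs.drop startN).length = 0 ∨ ((cs.drop startN).length : Int) ≤ spl) := by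
        rw [hslen]; omega
      -- the window p = arr[:split_len]
      have hslice : PySem.List.slice (cs.drop startN) none (some spl) = (cs.drop startN).take k :=
        PySem.List.slice_to _ (by omega)
      set p := (cs.drop startN).take k with hpdef
      have hplen : p.length = k := by
        rw [hpdef, List.length_take]; omega
      have hpelem : ∀ (m : Nat) (hm : m < k), p[m]'(by omega) = cs[startN + m]'(by omega) := by
        intro m hm
        simp only [hpdef, List.getElem_take, List.getElem_drop]
      -- B's consume step
      set limit := (startN : Int) + spl with hlimdef
      set tw := spaces.takeWhile (fun x => decide (x < limit)) with htwdef
      set dw := spaces.dropWhile (fun x => decide (x < limit)) with hdwdef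
      have hsplit : tw ++ dw = spaces := List.takeWhile_append_dropWhile
      have hcons : pvConsumeB limit spaces brk = (dw, tw.getLastD brk) := pvConsume_eq limit spaces brk
      have hdwge : ∀ x ∈ dw, limit ≤ x := pvDropWhile_ge limit spaces hsppw
      have htwlt : ∀ x ∈ tw, x < limit := by
        intro x hx
        simpa using List.mem_takeWhile_imp hx
      have htwmem : ∀ x ∈ tw, x ∈ spaces := fun x hx => (List.takeWhile_sublist _).mem hx
      -- a space at window offset m lands in tw
      have hwindow : ∀ (m : Nat) (hm : m < k) (hmlen : startN + m < cs.length),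
          cs[startN + m]'(hmlen) = ' ' → ((startN + m : Nat) : Int) ∈ tw := by
        intro m hm hmlen hcm
        have hins : ((startN + m : Nat) : Int) ∈ spaces := pvSpace_in_spaces cs startN done spaces hW hdone m hmlen hcm
        rw [← hsplit] at hins
        rcases List.mem_append.mp hins with h | h
        · exact h
        · have := hdwge _ h
          exfalso
          have : ((startN + m : Nat) : Int) < limit := by push_cast; omega
          omega
      simp only [pvLoopA, pvLoopB]
      rw [if_neg hAcond, if_pos hc, ← hlimdef, hcons]
      cases htw : tw with
      | nil =>
        -- no space in the window: hard cut at split_len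
        have hbrk' : ¬ (tw.getLastD brk ≥ (startN : Int)) := by rw [htw]; simpa using hbrk
        have hnospace : ∀ c ∈ p, c ≠ ' ' := by
          intro c hcp hceq
          rcases List.mem_iff_getElem.mp hcp with ⟨m, hmlt, hms⟩
          have hmk : m < k := by omega
          have : ((startN + m : Nat) : Int) ∈ tw := by
            apply hwindow m hmk (by rw [hplen] at hmlt; omega)
            rw [← hpelem m hmk, hms, hceq]
          rw [htw] at this
          simp at this
        have htmp : pvStripA (cs.drop startN) spl (PySem.List.slice (cs.drop startN) none (some spl)) = p := by
          rw [hslice, pvStrip_nospace _ _ _ hnospace, hslice]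
        rw [htmp]
        simp only [List.getLastD_nil]
        rw [if_neg (show ¬ (brk ≥ (startN : Int)) by omega)]
        have he : (startN : Int) + spl = ((startN + k : Nat) : Int) := by push_cast; omega
        have hsliceB : PySem.List.slice cs (some (startN : Int)) (some ((startN : Int) + spl)) = p := by
          rw [he]
          rw [show ((startN + k : Nat) : Int) = ((startN : Nat) : Int) + ((k : Nat) : Int) by push_cast; ring]
          rw [PySem.List.slice_natCast_add]
        have hnext : PySem.List.slice (cs.drop startN) (some ((p.length : Nat) : Int)) none = cs.drop (startN + k) := by
          rw [hplen, PySem.List.slice_from_natCast, List.drop_drop]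
        have hres : PySem.Chars.join [] lines ++ p ++ ['\n'] = PySem.Chars.join [] (lines ++ [p ++ ['\n']]) := by
          rw [pvJoin_snoc]; simp
        have hrow : (lines.length : Int) + 1 = ((lines ++ [p ++ ['\n']]).length : Int) := by
          simp
        rw [hlimdef, hnext, hsliceB, hres, hrow, he]
        exact ih (startN + k) done dw brk (lines ++ [p ++ ['\n']])
          (by omega)
          (by rw [hW, ← hsplit, htw]; simp)
          (fun x hx => by have := hdone x hx; push_cast at this ⊢; omega)
          (fun x hx => by have := hdwge x hx; rw [hlimdef] at this; push_cast at this ⊢; omega)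
          (by push_cast; omega)
      | cons t0 tl =>
        -- the window contains a space: break after the last one
        rw [← htw]
        have hlastmem : tw.getLastD brk ∈ tw := by rw [htw]; exact List.mem_of_getLast? rfl
        have hlastsp : tw.getLastD brk ∈ spaces := htwmem _ hlastmem
        have hlastW : tw.getLastD brk ∈ pvSpacesB cs := by rw [hW]; exact List.mem_append_right _ hlastsp
        rcases (pvMem_spacesB cs _).mp hlastW with ⟨q, hq, hqeq, hqc⟩
        have hqge : (startN : Int) ≤ (q : Int) := by rw [← hqeq]; exact hsp _ hlastsp
        have hqlt : (q : Int) < limit := by rw [← hqeq]; exact htwlt _ hlastmem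
        set r := q - startN with hrdef
        have hqr : q = startN + r := by omega
        have hrk : r < k := by rw [hlimdef] at hqlt; push_cast at hqge hqlt; omega
        have hpr : p[r]'(by omega) = ' ' := by
          rw [hpelem r hrk]
          simp only [show startN + r = q from by omega]
          exact hqc
        have htail : ∀ c ∈ p.drop (r + 1), c ≠ ' ' := by
          intro c hcp hceq
          subst hceq
          rcases List.mem_iff_getElem.mp hcp with ⟨j, hjlt, hjs⟩
          have hjk : r + 1 + j < k := by
            have h2 := hjlt
            rw [List.length_drop, hplen] at h2
            omega
          have hpj : p[r + 1 + j]'(by omega) = ' ' := by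
            have h3 : (p.drop (r + 1))[j]'hjlt = p[r + 1 + j]'(by omega) := by
              rw [List.getElem_drop]
            rw [← h3]
            exact hjs
          have hintw : ((startN + (r + 1 + j) : Nat) : Int) ∈ tw :=
            hwindow _ hjk (by omega) (by rw [← hpelem _ hjk]; exact hpj)
          have hle := pvLe_getLastD tw brk (hsppw.sublist (List.takeWhile_sublist _)) _ hintw
          rw [hqeq] at hle
          push_cast at hle
          omega
        have hdecomp : p = p.take r ++ ' ' :: p.drop (r + 1) := by
          conv_lhs => rw [← List.take_append_drop (r+1) p]
          rw [List.take_succ_eq_append_getElem (by omega), hpr]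
          simp
        have htmp : pvStripA (cs.drop startN) spl (PySem.List.slice (cs.drop startN) none (some spl)) = p.take r ++ [' '] := by
          rw [hslice]
          conv_lhs => rw [hdecomp]
          exact pvStrip_space _ _ _ _ htail
        have htmplen : (p.take r ++ [' ']).length = r + 1 := by
          simp [List.length_take]; omega
        have hbrkge : tw.getLastD brk ≥ (startN : Int) := by rw [hqeq]; exact_mod_cast hqge
        rw [htmp, if_pos hbrkge]
        have he : tw.getLastD brk + 1 = ((startN + (r + 1) : Nat) : Int) := by
          rw [hqeq]; push_cast; omega
        have hsliceB : PySem.List.slice cs (some (startN : Int)) (some (tw.getLastD brk + 1)) = p.take r ++ [' '] := by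
          rw [he]
          rw [show ((startN + (r + 1) : Nat) : Int) = ((startN : Nat) : Int) + ((r + 1 : Nat) : Int) by push_cast; ring]
          rw [PySem.List.slice_natCast_add]
          rw [show (cs.drop startN).take (r+1) = p.take (r+1) by
            rw [hpdef, List.take_take]; congr 1; omega]
          rw [List.take_succ_eq_append_getElem (by omega), hpr]
        have hnext : PySem.List.slice (cs.drop startN) (some (((p.take r ++ [' ']).length : Nat) : Int)) none = cs.drop (startN + (r + 1)) := by
          rw [htmplen, PySem.List.slice_from_natCast, List.drop_drop]
        have hres : PySem.Chars.join [] lines ++ (p.take r ++ [' ']) ++ ['\n'] =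
            PySem.Chars.join [] (lines ++ [(p.take r ++ [' ']) ++ ['\n']]) := by
          rw [pvJoin_snoc]; simp
        have hrow : (lines.length : Int) + 1 = ((lines ++ [(p.take r ++ [' ']) ++ ['\n']]).length : Int) := by
          simp
        rw [hnext, hsliceB, hres, hrow, he]
        exact ih (startN + (r + 1)) (done ++ tw) dw (tw.getLastD brk) (lines ++ [(p.take r ++ [' ']) ++ ['\n']])
          (by omega)
          (by rw [hW, ← hsplit]; simp)
          (by
            intro x hx
            rcases List.mem_append.mp hx with h | h
            · have := hdone x h; push_cast at this ⊢; omega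
            · have h1 := pvLe_getLastD tw brk (hsppw.sublist (List.takeWhile_sublist _)) x h
              rw [hqeq] at h1; push_cast at h1 ⊢; omega)
          (by
            intro x hx
            have := hdwge x hx
            rw [hlimdef] at this
            push_cast at this ⊢
            omega)
          (by rw [hqeq]; push_cast; omega)
    · -- loop exits: both emit the final line
      have hAcond : (cs.drop startN).length = 0 ∨ ((cs.drop startN).length : Int) ≤ spl := by
        rw [hslen]; omega
      rw [pvLoopA, pvLoopB, if_pos hAcond, if_neg (by omega)]
      rw [PySem.List.slice_from_natCast, pvJoin_snoc]
      simp

-- ===== VERDICT (by name: the statement is the Claim_ definition above) =====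
theorem arrange_string_spec : Claim_equal_arrange_string := by
  unfold Claim_equal_arrange_string
  intro arr spl _ hpre
  unfold Spec_arrange_string arrange_string arrange_string_alt
  rcases hpre with hspl | hempty
  · by_cases h0 : arr.toList.length = 0 ∨ (arr.toList.length : Int) ≤ spl
    · rw [if_pos h0]
      simp only [pvLoopA, if_pos h0]
      simp [String.ofList_toList]
    · rw [if_neg h0]
      have h := pvLoop_eq arr.toList spl hspl (arr.toList.length + 1) 0 [] (pvSpacesB arr.toList) (-1) []
        (by omega) (by simp) (by simp)
        (fun x hx => by
          rcases (pvMem_spacesB _ _).mp hx with ⟨m, hm, rfl, _⟩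
          exact_mod_cast Int.natCast_nonneg m)
        (by norm_num)
      simp only [List.drop_zero, List.length_nil, Nat.cast_zero,
        show PySem.Chars.join [] ([] : List (List Char)) = [] from rfl] at h
      rw [h]
  · subst hempty
    simp [pvLoopA]
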